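-- pv_equiv track=rewrite | github.com/mikeizbicki/quiz | quiz_python/quiz04b_markdown/0004.py | compile_italic_underscore
-- ===== SOURCE A (Python) =====
-- def compile_italic_underscore(line):
--     newline = ''
--     is_italic = False
--     for x in line:
--         if x == '_' and not is_italic:
--             newline = newline + '<i>'
--             is_italic = True
--         elif x == '_' and is_italic:
--             newline = newline + '</i>'
--         else:
--             newline = newline + x
--     return newline
-- ===== SOURCE B (Python) =====
-- def compile_italic_underscore(line):
--     # first underscore opens the tag, every later one closes (as A's never-reset flag does)
--     return line.replace('_', '<i>', 1).replace('_', '</i>')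
-- ===== Notes on version B (the rewrite author's own statement) =====
-- stated objective: idiomatic
-- what changed: Replaces the character loop with a boolean flag by two str.replace calls: the first underscore becomes '<i>' (count=1) and every remaining underscore becomes '</i>'.
import Mathlib
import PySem

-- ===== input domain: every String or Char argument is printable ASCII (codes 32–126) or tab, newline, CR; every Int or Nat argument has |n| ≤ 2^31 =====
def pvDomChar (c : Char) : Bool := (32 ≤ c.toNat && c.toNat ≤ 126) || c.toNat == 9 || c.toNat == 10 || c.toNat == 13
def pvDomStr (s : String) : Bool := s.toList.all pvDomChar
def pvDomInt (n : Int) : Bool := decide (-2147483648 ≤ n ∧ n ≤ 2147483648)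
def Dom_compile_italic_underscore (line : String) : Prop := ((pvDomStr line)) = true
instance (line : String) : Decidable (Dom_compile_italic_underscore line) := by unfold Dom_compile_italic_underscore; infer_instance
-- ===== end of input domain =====

-- B replaces the per-character loop with a boolean flag by two str.replace passes (first underscore -> '<i>', the rest -> '</i>'); more idiomatic.


-- ===== PORT A =====
-- state = (newline so far, is_italic); a literal fold of A's character loop
def pvStepA (st : List Char × Bool) (x : Char) : List Char × Bool :=
  if x = '_' ∧ st.2 = false then (st.1 ++ ['<', 'i', '>'], true)
  else if x = '_' ∧ st.2 = true then (st.1 ++ ['<', '/', 'i', '>'], st.2)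
  else (st.1 ++ [x], st.2)

def compile_italic_underscore (line : String) : String :=
  String.mk (line.toList.foldl pvStepA ([], false)).1

-- ===== PORT B =====
-- hand ports of str.replace for a single-character pattern (PySem.Str.replace has no
-- count parameter); exact on every string since a one-char pattern cannot overlap
def pvReplaceOnce (cs : List Char) : List Char :=   -- line.replace('_', '<i>', 1)
  match cs with
  | [] => []
  | c :: rest => if c = '_' then '<' :: 'i' :: '>' :: rest else c :: pvReplaceOnce rest

def pvReplaceAll (cs : List Char) : List Char :=    -- .replace('_', '</i>')
  match cs with
  | [] => []
  | c :: rest => if c = '_' then '<' :: '/' :: 'i' :: '>' :: pvReplaceAll rest else c :: pvReplaceAll rest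

def compile_italic_underscore_alt (line : String) : String :=
  String.mk (pvReplaceAll (pvReplaceOnce line.toList))

-- ===== PRECONDITION & SPEC =====
def Spec_compile_italic_underscore (line : String) (out : String) : Prop := out = compile_italic_underscore_alt line
instance (line : String) (out : String) : Decidable (Spec_compile_italic_underscore line out) := by unfold Spec_compile_italic_underscore; infer_instance

-- ===== CLAIM (what is proved, stated in full; the proofs are below) =====
def Claim_equal_compile_italic_underscore : Prop := ∀ (line : String), Dom_compile_italic_underscore line → Spec_compile_italic_underscore line (compile_italic_underscore line)

-- ===== LEMMAS AND PROOFS =====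
theorem foldA_true (cs : List Char) (acc : List Char) :
    (cs.foldl pvStepA (acc, true)).1 = acc ++ pvReplaceAll cs := by
  induction cs generalizing acc with
  | nil => simp [pvReplaceAll]
  | cons c rest ih =>
    by_cases h : c = '_' <;> simp [pvStepA, pvReplaceAll, h, ih]

theorem foldA_false (cs : List Char) (acc : List Char) :
    (cs.foldl pvStepA (acc, false)).1 = acc ++ pvReplaceAll (pvReplaceOnce cs) := by
  induction cs generalizing acc with
  | nil => simp [pvReplaceOnce, pvReplaceAll]
  | cons c rest ih =>
    by_cases h : c = '_'
    · simp [pvStepA, pvReplaceOnce, pvReplaceAll, h, foldA_true]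
    · simp [pvStepA, pvReplaceOnce, pvReplaceAll, h, ih]

-- ===== VERDICT (by name: the statement is the Claim_ definition above) =====
theorem compile_italic_underscore_spec : Claim_equal_compile_italic_underscore := by
  intro line _
  unfold Spec_compile_italic_underscore compile_italic_underscore compile_italic_underscore_alt
  rw [foldA_false]
  simp
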